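-- pv_equiv track=rewrite | github.com/ManusaRivi/practica-tda | parcial_2-1/3.py | validador_mesas
-- ===== SOURCE A (Python) =====
-- def validador_mesas(invitados, vinculos, k, solucion):
--     invitados_solucion = set()
--
--     if len(solucion) != k:
--         return False
--
--     for mesa in solucion:
--         for invitado in mesa:
--             if invitado not in invitados:
--                 return False
--
--             invitados_solucion.add(invitado)
--
--             for inv in mesa:
--                 if inv == invitado:
--                     continue
--                 if not ((invitado, inv) in vinculos or (inv, invitado) in vinculos):
--                     return False
--
--     if len(invitados_solucion) != len(invitados):
--         return False
--
--     return True
-- ===== SOURCE B (Python) =====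
-- def validador_mesas(invitados, vinculos, k, solucion):
--     if len(solucion) != k:
--         return False
--     # coverage pass: union of all tables against the allowed guest set
--     guests = set()
--     for mesa in solucion:
--         guests |= set(mesa)
--     if not guests <= set(invitados) or len(guests) != len(invitados):
--         return False
--     # clique pass by edge counting: a table of m distinct guests is a clique
--     # iff the number of distinct unordered links internal to it equals m*(m-1)/2
--     for mesa in solucion:
--         distintos = set(mesa)
--         m = len(distintos)
--         internos = {(a, b) if a < b else (b, a)
--                     for (a, b) in vinculos
--                     if a in distintos and b in distintos and a != b}
--         if 2 * len(internos) != m * (m - 1):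
--             return False
--     return True
-- ===== Notes on version B (the rewrite author's own statement) =====
-- stated objective: alternative
-- what changed: A's single interleaved early-return loop (per-guest membership, set accumulation, and an ordered-pair scan of vinculos per guest pair) is replaced by a staged coverage pass plus an edge-counting clique test: per table B scans vinculos once, collects the distinct canonicalised links internal to the table, and declares the table a clique iff their count equals m*(m-1)/2 — no pair of guests is ever enumerated.
import Mathlib
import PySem

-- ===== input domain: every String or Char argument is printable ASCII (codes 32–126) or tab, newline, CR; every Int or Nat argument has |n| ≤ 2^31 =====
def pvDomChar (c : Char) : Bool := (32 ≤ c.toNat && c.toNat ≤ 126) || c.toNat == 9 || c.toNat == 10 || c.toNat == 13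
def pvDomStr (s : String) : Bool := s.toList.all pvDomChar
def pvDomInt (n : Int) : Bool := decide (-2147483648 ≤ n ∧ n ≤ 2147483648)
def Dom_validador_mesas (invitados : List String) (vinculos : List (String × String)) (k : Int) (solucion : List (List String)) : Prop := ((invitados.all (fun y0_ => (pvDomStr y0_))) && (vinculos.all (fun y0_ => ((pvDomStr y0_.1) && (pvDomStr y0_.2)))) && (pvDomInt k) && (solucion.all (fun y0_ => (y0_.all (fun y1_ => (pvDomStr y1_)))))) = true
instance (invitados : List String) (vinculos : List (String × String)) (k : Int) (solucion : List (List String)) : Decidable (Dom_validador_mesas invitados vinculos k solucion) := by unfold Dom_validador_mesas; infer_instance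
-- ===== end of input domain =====

-- B replaces A's single interleaved early-return loop by a staged coverage pass plus an
-- edge-counting clique test per table (distinct canonicalised internal links counted
-- against m*(m-1)/2) — no pair of guests is enumerated (objective: alternative).


-- ===== PORT A =====
-- inner 'for inv in mesa' loop of A (early return False)
def aPairs (vinculos : List (String × String)) (invitado : String) : List String → Bool
  | [] => true
  | inv :: rest =>
    if inv == invitado then aPairs vinculos invitado rest
    else if vinculos.contains (invitado, inv) || vinculos.contains (inv, invitado) then
      aPairs vinculos invitado rest
    else false

-- 'for invitado in mesa' loop of A; none = an early 'return False'
def aMesa (invitados : List String) (vinculos : List (String × String)) (mesa : List String)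
    (s : PySem.Set String) : List String → Option (PySem.Set String)
  | [] => some s
  | g :: rest =>
    if invitados.contains g = false then none
    else
      let s' := PySem.Set.add s g
      if aPairs vinculos g mesa then aMesa invitados vinculos mesa s' rest else none

-- 'for mesa in solucion' loop of A
def aLoop (invitados : List String) (vinculos : List (String × String))
    (s : PySem.Set String) : List (List String) → Option (PySem.Set String)
  | [] => some s
  | mesa :: rest =>
    match aMesa invitados vinculos mesa s mesa with
    | none => none
    | some s' => aLoop invitados vinculos s' rest

def validador_mesas (invitados : List String) (vinculos : List (String × String)) (k : Int) (solucion : List (List String)) : Bool :=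
  if (solucion.length : Int) ≠ k then false
  else
    match aLoop invitados vinculos PySem.Set.empty solucion with
    | none => false
    | some s => if (s.length : Int) ≠ (invitados.length : Int) then false else true

-- ===== PORT B =====
-- '(a, b) if a < b else (b, a)' of B (Lean's String < is Python's: lexicographic on code points)
def canonPair (a b : String) : String × String := if a < b then (a, b) else (b, a)

-- B's set comprehension: distinct canonicalised links internal to the table
def internosOf (vinculos : List (String × String)) (distintos : PySem.Set String) : PySem.Set (String × String) :=
  PySem.Set.ofList
    ((vinculos.filter (fun p =>
        PySem.Set.contains distintos p.1 && PySem.Set.contains distintos p.2 && p.1 != p.2)).map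
      (fun p => canonPair p.1 p.2))

def validador_mesas_alt (invitados : List String) (vinculos : List (String × String)) (k : Int) (solucion : List (List String)) : Bool :=
  if (solucion.length : Int) ≠ k then false
  else
    -- coverage pass: 'guests |= set(mesa)' over all tables
    let guests : PySem.Set String :=
      solucion.foldl (fun s mesa => PySem.Set.update s (PySem.Set.ofList mesa)) PySem.Set.empty
    if !(PySem.Set.issubset guests (PySem.Set.ofList invitados))
        || !((guests.length : Int) == (invitados.length : Int)) then false
    else
      -- clique pass by edge counting: 2*len(internos) must equal m*(m-1)
      solucion.all (fun mesa =>
        let distintos := PySem.Set.ofList mesa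
        let m := distintos.length
        let internos := internosOf vinculos distintos
        2 * internos.length == m * (m - 1))

-- ===== PRECONDITION & SPEC =====
def Spec_validador_mesas (invitados : List String) (vinculos : List (String × String)) (k : Int) (solucion : List (List String)) (out : Bool) : Prop := out = validador_mesas_alt invitados vinculos k solucion
instance (invitados : List String) (vinculos : List (String × String)) (k : Int) (solucion : List (List String)) (out : Bool) : Decidable (Spec_validador_mesas invitados vinculos k solucion out) := by unfold Spec_validador_mesas; infer_instance

-- ===== CLAIM (what is proved, stated in full; the proofs are below) =====
def Claim_equal_validador_mesas : Prop := ∀ (invitados : List String) (vinculos : List (String × String)) (k : Int) (solucion : List (List String)), Dom_validador_mesas invitados vinculos k solucion → Spec_validador_mesas invitados vinculos k solucion (validador_mesas invitados vinculos k solucion)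

-- ===== LEMMAS AND PROOFS =====

-- the symmetric "linked" relation both programs test
def linkedR (vinculos : List (String × String)) (a b : String) : Prop :=
  (a, b) ∈ vinculos ∨ (b, a) ∈ vinculos

lemma linkedR_symm (vinculos : List (String × String)) :
    Symmetric (linkedR vinculos) := fun _ _ h => h.symm

lemma aPairs_eq_true_iff (vinculos : List (String × String)) (g : String) (l : List String) :
    aPairs vinculos g l = true ↔ ∀ b ∈ l, b ≠ g → linkedR vinculos g b := by
  induction l with
  | nil => simp [aPairs]
  | cons x rest ih =>
    simp only [aPairs, List.mem_cons]
    split_ifs with hx hl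
    · rw [ih]
      simp only [beq_iff_eq] at hx
      subst hx
      constructor
      · intro h b hb hbn
        rcases hb with rfl | hb
        · exact absurd rfl hbn
        · exact h b hb hbn
      · intro h b hb hbn
        exact h b (Or.inr hb) hbn
    · rw [ih]
      simp only [beq_iff_eq] at hx
      have hlx : linkedR vinculos g x := by
        simpa [linkedR, List.contains_iff_mem] using hl
      constructor
      · intro h b hb hbn
        rcases hb with rfl | hb
        · exact hlx
        · exact h b hb hbn
      · intro h b hb hbn
        exact h b (Or.inr hb) hbn
    · simp only [beq_iff_eq] at hx
      have hlx : ¬ linkedR vinculos g x := by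
        simpa [linkedR, List.contains_iff_mem] using hl
      refine iff_of_false (by simp) ?_
      intro h
      exact hlx (h x (Or.inl rfl) hx)

-- per-guest check of A as a boolean predicate
def checkG (invitados : List String) (vinculos : List (String × String)) (mesa : List String) (g : String) : Bool :=
  invitados.contains g && aPairs vinculos g mesa

lemma aMesa_eq (invitados : List String) (vinculos : List (String × String)) (mesa : List String)
    (s : PySem.Set String) (gs : List String) :
    aMesa invitados vinculos mesa s gs =
      if gs.all (checkG invitados vinculos mesa) then some (gs.foldl PySem.Set.add s) else none := by
  induction gs generalizing s with
  | nil => simp [aMesa]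
  | cons g rest ih =>
    by_cases hm : invitados.contains g = true
    · have hg : g ∈ invitados := by simpa using hm
      by_cases hp : aPairs vinculos g mesa = true
      · rw [aMesa, if_neg (by simp [hg]), if_pos hp, ih]
        simp [checkG, hp, hg]
      · rw [aMesa, if_neg (by simp [(by simpa using hm : g ∈ invitados)]), if_neg hp]
        simp [checkG, hp]
    · have hm' : invitados.contains g = false := by simpa using hm
      have hg : ¬ g ∈ invitados := by simpa using hm'
      rw [aMesa, if_pos hm']
      simp [checkG, hg]

lemma aLoop_eq (invitados : List String) (vinculos : List (String × String))
    (s : PySem.Set String) (ms : List (List String)) :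
    aLoop invitados vinculos s ms =
      if ms.all (fun mesa => mesa.all (checkG invitados vinculos mesa)) then
        some (ms.foldl (fun s mesa => PySem.Set.update s mesa) s) else none := by
  induction ms generalizing s with
  | nil => simp [aLoop]
  | cons mesa rest ih =>
    rw [aLoop, aMesa_eq]
    by_cases hm : mesa.all (checkG invitados vinculos mesa)
    · have hupd : mesa.foldl PySem.Set.add s = PySem.Set.update s mesa := rfl
      simp [hm, ih, hupd]
    · simp [hm]

lemma mem_guests (solucion : List (List String)) (s : PySem.Set String) (y : String) :
    y ∈ solucion.foldl (fun s mesa => PySem.Set.update s mesa) s ↔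
      y ∈ s ∨ ∃ mesa ∈ solucion, y ∈ mesa := by
  induction solucion generalizing s with
  | nil => simp
  | cons mesa rest ih =>
    simp [List.foldl_cons, ih, PySem.Set.mem_update]
    tauto

-- B's guest fold (union of set(mesa)) builds the same set as A's (adds of raw mesa)
lemma update_ofList_eq (s : PySem.Set String) (xs : List String) :
    PySem.Set.update s (PySem.Set.ofList xs) = PySem.Set.update s xs := by
  rw [PySem.Set.update_eq_append_filter, PySem.Set.update_eq_append_filter, PySem.Set.ofList_ofList]

-- characterisation of A
lemma A_true_iff (invitados : List String) (vinculos : List (String × String)) (k : Int)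
    (solucion : List (List String)) :
    validador_mesas invitados vinculos k solucion = true ↔
      (solucion.length : Int) = k ∧
      (∀ mesa ∈ solucion, ∀ g ∈ mesa, g ∈ invitados) ∧
      (∀ mesa ∈ solucion, ∀ g ∈ mesa, aPairs vinculos g mesa = true) ∧
      ((solucion.foldl (fun s mesa => PySem.Set.update s mesa) PySem.Set.empty).length : Int)
        = (invitados.length : Int) := by
  unfold validador_mesas
  by_cases hk : (solucion.length : Int) = k
  · rw [if_neg (by simpa using hk), aLoop_eq]
    by_cases hc : solucion.all (fun mesa => mesa.all (checkG invitados vinculos mesa)) = true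
    · have hc' := hc
      simp only [List.all_eq_true, checkG, Bool.and_eq_true, List.contains_iff_mem] at hc'
      rw [if_pos hc]
      by_cases hs : ((solucion.foldl (fun s mesa => PySem.Set.update s mesa) PySem.Set.empty).length : Int)
          = (invitados.length : Int)
      · show (if ((solucion.foldl (fun s mesa => PySem.Set.update s mesa) PySem.Set.empty).length : Int)
            ≠ (invitados.length : Int) then false else true) = true ↔ _
        rw [if_neg (by simpa using hs)]
        exact iff_of_true rfl ⟨hk, fun m hm g hg => (hc' m hm g hg).1,
          fun m hm g hg => (hc' m hm g hg).2, hs⟩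
      · show (if ((solucion.foldl (fun s mesa => PySem.Set.update s mesa) PySem.Set.empty).length : Int)
            ≠ (invitados.length : Int) then false else true) = true ↔ _
        rw [if_pos hs]
        refine iff_of_false (by simp) ?_
        rintro ⟨-, -, -, h⟩
        exact hs h
    · rw [if_neg hc]
      refine iff_of_false (by simp) ?_
      rintro ⟨-, hmem, hpair, -⟩
      apply hc
      simp only [List.all_eq_true, checkG, Bool.and_eq_true, List.contains_iff_mem]
      exact fun m hm g hg => ⟨hmem m hm g hg, hpair m hm g hg⟩
  · refine iff_of_false ?_ (fun h => hk h.1)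
    rw [if_pos (by simpa using hk)]
    simp

-- membership in B's internos set
lemma mem_internos (vinculos : List (String × String)) (D : PySem.Set String) (x : String × String) :
    x ∈ internosOf vinculos D ↔
      ∃ p ∈ vinculos, p.1 ∈ D ∧ p.2 ∈ D ∧ p.1 ≠ p.2 ∧ x = canonPair p.1 p.2 := by
  simp only [internosOf, PySem.Set.mem_ofList, List.mem_map, List.mem_filter,
    Bool.and_eq_true, bne_iff_ne, PySem.Set.contains_iff]
  tauto

-- every element of internos is an increasing pair of table guests
lemma internos_shape {vinculos : List (String × String)} {D : PySem.Set String}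
    {x : String × String} (hx : x ∈ internosOf vinculos D) :
    x.1 ∈ D ∧ x.2 ∈ D ∧ x.1 < x.2 := by
  rw [mem_internos] at hx
  obtain ⟨p, -, h1, h2, h3, rfl⟩ := hx
  unfold canonPair
  rcases lt_trichotomy p.1 p.2 with h | h | h
  · rw [if_pos h]; exact ⟨h1, h2, h⟩
  · exact absurd h h3
  · rw [if_neg (lt_asymm h)]; exact ⟨h2, h1, h⟩

lemma canon_mem_internos_iff {vinculos : List (String × String)} {D : PySem.Set String}
    {a b : String} (ha : a ∈ D) (hb : b ∈ D) (hab : a < b) :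
    (a, b) ∈ internosOf vinculos D ↔ linkedR vinculos a b := by
  rw [mem_internos, linkedR]
  constructor
  · rintro ⟨⟨c, d⟩, hp, -, -, -, hEq⟩
    unfold canonPair at hEq
    split_ifs at hEq
    · cases hEq; exact Or.inl hp
    · cases hEq; exact Or.inr hp
  · rintro (h | h)
    · exact ⟨(a, b), h, ha, hb, ne_of_lt hab, by simp [canonPair, hab]⟩
    · exact ⟨(b, a), h, hb, ha, (ne_of_lt hab).symm, by simp [canonPair, lt_asymm hab]⟩

-- counting: the increasing pairs over a finite set number card*(card-1)/2
lemma two_mul_card_filter_lt (F : Finset String) :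
    2 * ((F ×ˢ F).filter (fun p => p.1 < p.2)).card = F.card * (F.card - 1) := by
  have hswap : ((F ×ˢ F).filter (fun p => p.1 < p.2)).card
      = ((F ×ˢ F).filter (fun p => p.2 < p.1)).card := by
    apply Finset.card_bij (fun p _ => p.swap)
    · intro p hp
      simp only [Finset.mem_filter, Finset.mem_product] at hp ⊢
      exact ⟨⟨hp.1.2, hp.1.1⟩, hp.2⟩
    · intro p _ q _ h
      exact Prod.swap_injective h
    · intro q hq
      refine ⟨q.swap, ?_, by simp⟩
      simp only [Finset.mem_filter, Finset.mem_product] at hq ⊢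
      exact ⟨⟨hq.1.2, hq.1.1⟩, hq.2⟩
  have hunion : F.offDiag =
      (F ×ˢ F).filter (fun p => p.1 < p.2) ∪ (F ×ˢ F).filter (fun p => p.2 < p.1) := by
    ext p
    simp only [Finset.mem_offDiag, Finset.mem_union, Finset.mem_filter, Finset.mem_product]
    constructor
    · rintro ⟨h1, h2, hne⟩
      rcases lt_trichotomy p.1 p.2 with h | h | h
      · exact Or.inl ⟨⟨h1, h2⟩, h⟩
      · exact absurd h hne
      · exact Or.inr ⟨⟨h1, h2⟩, h⟩
    · rintro (⟨⟨h1, h2⟩, h⟩ | ⟨⟨h1, h2⟩, h⟩)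
      · exact ⟨h1, h2, ne_of_lt h⟩
      · exact ⟨h1, h2, (ne_of_lt h).symm⟩
  have hdisj : Disjoint ((F ×ˢ F).filter (fun p => p.1 < p.2))
      ((F ×ˢ F).filter (fun p => p.2 < p.1)) := by
    rw [Finset.disjoint_left]
    intro p hp hq
    simp only [Finset.mem_filter] at hp hq
    exact absurd hq.2 (lt_asymm hp.2)
  have hoff := Finset.offDiag_card F
  rw [hunion, Finset.card_union_of_disjoint hdisj, ← hswap] at hoff
  have hm : F.card * (F.card - 1) = F.card * F.card - F.card := by
    cases F.card with
    | zero => simp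
    | succ n => simp [Nat.mul_succ, Nat.succ_mul]
  omega

-- B's edge count test on a table ⟺ A's per-guest ordered pair scan
lemma count_iff (vinculos : List (String × String)) (mesa : List String) :
    (2 * (internosOf vinculos (PySem.Set.ofList mesa)).length ==
        (PySem.Set.ofList mesa).length * ((PySem.Set.ofList mesa).length - 1)) = true ↔
      ∀ g ∈ mesa, aPairs vinculos g mesa = true := by
  have hD : (PySem.Set.ofList mesa).Nodup := PySem.Set.nodup_ofList mesa
  have hS : (internosOf vinculos (PySem.Set.ofList mesa)).Nodup := PySem.Set.nodup_ofList _
  have hsub : (internosOf vinculos (PySem.Set.ofList mesa)).toFinset ⊆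
      ((PySem.Set.ofList mesa).toFinset ×ˢ (PySem.Set.ofList mesa).toFinset).filter
        (fun p => p.1 < p.2) := by
    intro x hx
    rw [List.mem_toFinset] at hx
    obtain ⟨h1, h2, h3⟩ := internos_shape hx
    simp only [Finset.mem_filter, Finset.mem_product, List.mem_toFinset]
    exact ⟨⟨h1, h2⟩, h3⟩
  have hcardS := List.toFinset_card_of_nodup hS
  have hcardD := List.toFinset_card_of_nodup hD
  have h2T := two_mul_card_filter_lt (PySem.Set.ofList mesa).toFinset
  rw [beq_iff_eq]
  constructor
  · intro h g hg
    have hST : (internosOf vinculos (PySem.Set.ofList mesa)).toFinset =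
        ((PySem.Set.ofList mesa).toFinset ×ˢ (PySem.Set.ofList mesa).toFinset).filter
          (fun p => p.1 < p.2) := by
      rw [hcardD] at h2T
      have hTT : 2 * (((PySem.Set.ofList mesa).toFinset ×ˢ (PySem.Set.ofList mesa).toFinset).filter
          (fun p => p.1 < p.2)).card =
          2 * (internosOf vinculos (PySem.Set.ofList mesa)).length := h2T.trans h.symm
      apply Finset.eq_of_subset_of_card_le hsub
      omega
    rw [aPairs_eq_true_iff]
    intro b hb hne
    have hgD : g ∈ PySem.Set.ofList mesa := (PySem.Set.mem_ofList mesa g).mpr hg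
    have hbD : b ∈ PySem.Set.ofList mesa := (PySem.Set.mem_ofList mesa b).mpr hb
    rcases lt_trichotomy g b with hlt | heq | hlt
    · have hmem : (g, b) ∈ ((PySem.Set.ofList mesa).toFinset ×ˢ
          (PySem.Set.ofList mesa).toFinset).filter (fun p => p.1 < p.2) := by
        simp only [Finset.mem_filter, Finset.mem_product, List.mem_toFinset]
        exact ⟨⟨hgD, hbD⟩, hlt⟩
      rw [← hST, List.mem_toFinset] at hmem
      exact (canon_mem_internos_iff hgD hbD hlt).mp hmem
    · exact absurd heq.symm hne
    · have hmem : (b, g) ∈ ((PySem.Set.ofList mesa).toFinset ×ˢ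
          (PySem.Set.ofList mesa).toFinset).filter (fun p => p.1 < p.2) := by
        simp only [Finset.mem_filter, Finset.mem_product, List.mem_toFinset]
        exact ⟨⟨hbD, hgD⟩, hlt⟩
      rw [← hST, List.mem_toFinset] at hmem
      exact linkedR_symm vinculos ((canon_mem_internos_iff hbD hgD hlt).mp hmem)
  · intro h
    have hTS : ((PySem.Set.ofList mesa).toFinset ×ˢ (PySem.Set.ofList mesa).toFinset).filter
        (fun p => p.1 < p.2) ⊆ (internosOf vinculos (PySem.Set.ofList mesa)).toFinset := by
      rintro ⟨a, b⟩ hx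
      simp only [Finset.mem_filter, Finset.mem_product, List.mem_toFinset] at hx
      obtain ⟨⟨h1, h2⟩, hlt⟩ := hx
      rw [List.mem_toFinset]
      apply (canon_mem_internos_iff h1 h2 hlt).mpr
      have h1m : a ∈ mesa := (PySem.Set.mem_ofList mesa a).mp h1
      have h2m : b ∈ mesa := (PySem.Set.mem_ofList mesa b).mp h2
      exact (aPairs_eq_true_iff vinculos a mesa).mp (h a h1m) b h2m (ne_of_lt hlt).symm
    have hST := Finset.Subset.antisymm hsub hTS
    have hc := congrArg Finset.card hST
    rw [hcardD] at h2T
    have h2 : 2 * (internosOf vinculos (PySem.Set.ofList mesa)).length =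
        2 * (((PySem.Set.ofList mesa).toFinset ×ˢ (PySem.Set.ofList mesa).toFinset).filter
          (fun p => p.1 < p.2)).card := by omega
    exact h2.trans h2T

-- characterisation of B
lemma B_true_iff (invitados : List String) (vinculos : List (String × String)) (k : Int)
    (solucion : List (List String)) :
    validador_mesas_alt invitados vinculos k solucion = true ↔
      (solucion.length : Int) = k ∧
      (∀ mesa ∈ solucion, ∀ g ∈ mesa, g ∈ invitados) ∧
      (∀ mesa ∈ solucion, ∀ g ∈ mesa, aPairs vinculos g mesa = true) ∧
      ((solucion.foldl (fun s mesa => PySem.Set.update s mesa) PySem.Set.empty).length : Int)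
        = (invitados.length : Int) := by
  unfold validador_mesas_alt
  simp only [update_ofList_eq]
  by_cases hk : (solucion.length : Int) = k
  · rw [if_neg (by simpa using hk)]
    by_cases hsub : PySem.Set.issubset
        (solucion.foldl (fun s mesa => PySem.Set.update s mesa) PySem.Set.empty)
        (PySem.Set.ofList invitados) = true
    · by_cases hlen : ((solucion.foldl (fun s mesa => PySem.Set.update s mesa) PySem.Set.empty).length : Int)
          = (invitados.length : Int)
      · have hC : (!(PySem.Set.issubset
              (solucion.foldl (fun s mesa => PySem.Set.update s mesa) PySem.Set.empty)
              (PySem.Set.ofList invitados)) ||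
            !((((solucion.foldl (fun s mesa => PySem.Set.update s mesa) PySem.Set.empty).length : Int))
              == ((invitados.length : Int)))) = false := by
          rw [hsub]
          simp
          exact_mod_cast hlen
        rw [if_neg (by intro h; rw [hC] at h; exact absurd h (by decide))]
        have hmem : ∀ mesa ∈ solucion, ∀ g ∈ mesa, g ∈ invitados := by
          intro m hm g hg
          have := (PySem.Set.issubset_iff _ _).mp hsub g
            ((mem_guests solucion PySem.Set.empty g).mpr (Or.inr ⟨m, hm, hg⟩))
          simpa [PySem.Set.mem_ofList] using this
        simp only [List.all_eq_true]
        constructor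
        · intro h
          exact ⟨hk, hmem, fun m hm g hg => (count_iff vinculos m).mp (h m hm) g hg, hlen⟩
        · rintro ⟨-, -, hpair, -⟩
          intro m hm
          exact (count_iff vinculos m).mpr (fun g hg => hpair m hm g hg)
      · rw [if_pos (by rw [hsub]; simpa using hlen)]
        refine iff_of_false (by simp) ?_
        rintro ⟨-, -, -, h⟩
        exact hlen h
    · have hsub' : PySem.Set.issubset
          (solucion.foldl (fun s mesa => PySem.Set.update s mesa) PySem.Set.empty)
          (PySem.Set.ofList invitados) = false := Bool.eq_false_iff.mpr hsub
      rw [if_pos (by rw [hsub']; simp)]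
      refine iff_of_false (by simp) ?_
      rintro ⟨-, hmem, -, -⟩
      apply hsub
      rw [PySem.Set.issubset_iff]
      intro x hx
      rcases (mem_guests solucion PySem.Set.empty x).mp hx with h | ⟨m, hm, hxm⟩
      · simp [PySem.Set.empty] at h
      · rw [PySem.Set.mem_ofList]
        exact hmem m hm x hxm
  · refine iff_of_false ?_ (fun h => hk h.1)
    rw [if_pos (by simpa using hk)]
    simp

-- ===== VERDICT (by name: the statement is the Claim_ definition above) =====
theorem validador_mesas_spec : Claim_equal_validador_mesas := by
  intro invitados vinculos k solucion _
  unfold Spec_validador_mesas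
  rw [Bool.eq_iff_iff, A_true_iff, B_true_iff]
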